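-- pv_equiv track=rewrite | github.com/arichar6/turbopy | chemistry/read_table.py | read_reaction
-- ===== SOURCE A (Python) =====
-- def read_reaction(sections):
--     header, data = None, None
--     j = 0
--     for s in sections:
--         if j % 2:
--             data = s
--             yield(header, data)
--         else:
--             header = s
--         j = j + 1
-- ===== SOURCE B (Python) =====
-- def read_reaction(sections):
--     lst = list(sections)
--     for pair in zip(lst[0::2], lst[1::2]):
--         yield pair
-- ===== Notes on version B (the rewrite author's own statement) =====
-- stated objective: alternative
-- what changed: Instead of a single stateful pass with an index-parity counter and header/data variables, B materialises the input, builds the even-index and odd-index subsequences with strided slices, and zips them into pairs; zip's truncation drops a trailing unpaired header just as A does.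
import Mathlib
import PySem

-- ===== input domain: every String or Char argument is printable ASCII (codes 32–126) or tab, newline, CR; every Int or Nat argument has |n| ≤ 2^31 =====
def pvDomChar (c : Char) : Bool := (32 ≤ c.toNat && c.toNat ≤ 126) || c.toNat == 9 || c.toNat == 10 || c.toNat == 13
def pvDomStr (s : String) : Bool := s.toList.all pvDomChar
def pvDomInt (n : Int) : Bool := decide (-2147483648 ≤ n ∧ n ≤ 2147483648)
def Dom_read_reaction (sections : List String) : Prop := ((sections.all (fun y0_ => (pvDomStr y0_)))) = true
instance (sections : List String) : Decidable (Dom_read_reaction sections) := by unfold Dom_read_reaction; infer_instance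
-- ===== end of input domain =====

-- B replaces A's stateful index/parity loop by strided slicing (evens/odds) + zip (alternative decomposition; same cost).


-- ===== PORT A =====
-- A's loop: header starts as Python None but every yield happens at odd j, after header was
-- assigned at the preceding even j, so the None is never emitted; we carry it as Option String
-- and the yield extracts it with getD "" (the default is unreachable).
def readReactionLoop (rest : List String) (header : Option String) (j : Int) (acc : List (String × String)) : List (String × String) :=
  match rest with
  | [] => acc
  | s :: rest' =>
    if PySem.Int.mod j 2 ≠ 0 then
      readReactionLoop rest' header (j + 1) (acc ++ [(header.getD "", s)])
    else
      readReactionLoop rest' (some s) (j + 1) acc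

def read_reaction (sections : List String) : List (String × String) :=
  readReactionLoop sections none 0 []

-- ===== PORT B =====
-- Hand port of the strided slice xs[0::2] (every second element starting at 0); PySem.List.slice
-- has no step parameter. Exact: Python's xs[0::2] keeps indices 0,2,4,….
def strideTwo (xs : List String) : List String :=
  match xs with
  | [] => []
  | [x] => [x]
  | x :: _ :: rest => x :: strideTwo rest

-- B: zip of lst[0::2] and lst[1::2] (lst[1::2] = (drop 1)[0::2]).
def read_reaction_alt (sections : List String) : List (String × String) :=
  List.zip (strideTwo sections) (strideTwo (sections.drop 1))

-- ===== PRECONDITION & SPEC =====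
def Spec_read_reaction (sections : List String) (out : List (String × String)) : Prop := out = read_reaction_alt sections
instance (sections : List String) (out : List (String × String)) : Decidable (Spec_read_reaction sections out) := by unfold Spec_read_reaction; infer_instance

-- ===== CLAIM (what is proved, stated in full; the proofs are below) =====
def Claim_equal_read_reaction : Prop := ∀ (sections : List String), Dom_read_reaction sections → Spec_read_reaction sections (read_reaction sections)

-- ===== LEMMAS AND PROOFS =====

theorem readReactionLoop_even (l : List String) :
    ∀ (h : Option String) (j : Int) (acc : List (String × String)), PySem.Int.mod j 2 = 0 →
      readReactionLoop l h j acc = acc ++ read_reaction_alt l := by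
  induction l using strideTwo.induct with
  | case3 a b rest ih =>
    intro h j acc hj
    have e : ∀ a : Int, PySem.Int.mod a 2 = a % 2 :=
      fun a => PySem.Int.mod_eq_emod_of_pos (by omega)
    have h1 : PySem.Int.mod (j + 1) 2 ≠ 0 := by rw [e] at hj ⊢; omega
    have h2 : PySem.Int.mod (j + 1 + 1) 2 = 0 := by rw [e] at hj ⊢; omega
    have step1 : readReactionLoop (a :: b :: rest) h j acc
        = readReactionLoop (b :: rest) (some a) (j + 1) acc := by
      simp only [readReactionLoop]
      rw [if_neg (not_not_intro hj)]
    have step2 : readReactionLoop (b :: rest) (some a) (j + 1) acc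
        = readReactionLoop rest (some a) (j + 1 + 1) (acc ++ [(a, b)]) := by
      simp only [readReactionLoop]
      rw [if_pos h1]
      simp
    rw [step1, step2, ih (some a) (j + 1 + 1) _ h2]
    cases rest with
    | nil => simp [read_reaction_alt, strideTwo]
    | cons c rest' =>
      simp [read_reaction_alt, strideTwo]
  | case1 =>
    intro h j acc hj
    simp [readReactionLoop, read_reaction_alt, strideTwo]
  | case2 a =>
    intro h j acc hj
    simp only [readReactionLoop]
    rw [if_neg (not_not_intro hj)]
    simp [readReactionLoop, read_reaction_alt, strideTwo]

-- ===== VERDICT (by name: the statement is the Claim_ definition above) =====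
theorem read_reaction_spec : Claim_equal_read_reaction := by
  intro sections _
  unfold Spec_read_reaction read_reaction
  simpa using readReactionLoop_even sections none 0 [] (by decide)
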